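-- pv_equiv track=rewrite | github.com/Skipper321/spacetime-crawler4py | tokenizer.py | tokenize_from_text
-- ===== SOURCE A (Python) =====
-- import string
--
-- def charToAscii(myChar):
--     return ord(myChar)
--
-- def isAsciiChar(ch) -> bool:
--
--     aVal = charToAscii(ch)
--
--     # numerical
--     if aVal > 47 and aVal < 58:
--         return True
--
--     # uppercase
--     if aVal > 64 and aVal < 91:
--         return True
--
--     # lowercase
--     if aVal > 96 and aVal < 123:
--         return True
--
--     return False
--
-- def isValidWord(word:string):
--     # Note: return -1 if valid
--
--     for i in range(0, len(word)):
--         if not isAsciiChar(word[i]):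
--             return i
--     return -1
--
-- def getSliceIndices(word:string):
--     indices = []
--     for i in range(0, len(word)):
--         currentChar = word[i]
--
--         if not isAsciiChar(currentChar):
--            indices.append(i)
--
--     return indices
--
-- def getSlicedWords(bigWord:string, firstSplit = -1):
--     splittedWords = []
--     prev = 0
--
--     idxs = getSliceIndices(bigWord) # O(N)
--     idxs.append(len(bigWord))
--
--     for i in idxs: # O(N) also
--         currentWord = bigWord[prev:i]
--         if currentWord.isalnum():
--             splittedWords.append(bigWord[prev:i])
--         prev = i + 1
--
--     return splittedWords
--
-- def tokenize_from_text(text: str):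
--     tokens = []
--     for line in text.splitlines():
--         for word in line.split():
--             try:
--                 valIndex = isValidWord(word)
--                 if valIndex == -1:
--                     tokens.append(word)
--                 else:
--                     wordsSlicedFromWord = getSlicedWords(word)
--                     tokens.extend(wordsSlicedFromWord)
--             except Exception:
--                 pass
--     return tokens
-- ===== SOURCE B (Python) =====
-- import re
--
-- _TOKEN = re.compile(r'[A-Za-z0-9]+')
--
-- def tokenize_from_text(text: str):
--     return _TOKEN.findall(text)
-- ===== Notes on version B (the rewrite author's own statement) =====
-- stated objective: idiomatic
-- what changed: Replaces the splitlines/split/per-word slice-index pipeline with a single regex pass extracting maximal [A-Za-z0-9]+ runs from the whole text.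
import Mathlib
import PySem

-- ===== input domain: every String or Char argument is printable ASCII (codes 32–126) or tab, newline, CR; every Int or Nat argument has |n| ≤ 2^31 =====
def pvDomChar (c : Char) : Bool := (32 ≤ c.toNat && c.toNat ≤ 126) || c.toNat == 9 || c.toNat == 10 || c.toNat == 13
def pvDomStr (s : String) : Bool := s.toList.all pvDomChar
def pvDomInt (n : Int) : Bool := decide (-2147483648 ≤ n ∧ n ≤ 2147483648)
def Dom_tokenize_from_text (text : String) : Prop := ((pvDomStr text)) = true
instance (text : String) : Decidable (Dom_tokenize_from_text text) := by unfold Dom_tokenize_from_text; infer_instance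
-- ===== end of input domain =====

-- B replaces A's splitlines/split/per-word slice-index pipeline with one direct scan for
-- maximal [A-Za-z0-9]+ runs (a regex findall in Python); objective: idiomatic.

-- ===== PORT A =====
def charToAscii (myChar : Char) : Int := myChar.toNat   -- ord(myChar)

def isAsciiChar (ch : Char) : Bool :=
  let aVal := charToAscii ch
  if aVal > 47 ∧ aVal < 58 then true
  else if aVal > 64 ∧ aVal < 91 then true
  else if aVal > 96 ∧ aVal < 123 then true
  else false

-- 'for i in range(0, len(word)): if not isAsciiChar(word[i]): return i' as structural
-- recursion carrying the running index i (word[i] with i in range is the head here).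
def isValidWordGo (word : List Char) (i : Nat) : Int :=
  match word with
  | [] => -1
  | c :: rest => if !isAsciiChar c then (i : Int) else isValidWordGo rest (i + 1)

def isValidWord (word : List Char) : Int := isValidWordGo word 0

def getSliceIndicesGo (word : List Char) (i : Nat) : List Nat :=
  match word with
  | [] => []
  | c :: rest =>
    if !isAsciiChar c then i :: getSliceIndicesGo rest (i + 1)
    else getSliceIndicesGo rest (i + 1)

def getSliceIndices (word : List Char) : List Nat := getSliceIndicesGo word 0

def getSlicedWords (bigWord : List Char) (firstSplit : Int) : List (List Char) :=
  let idxs := getSliceIndices bigWord ++ [bigWord.length]   -- idxs.append(len(bigWord))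
  (idxs.foldl (fun (st : List (List Char) × Nat) (i : Nat) =>
    let currentWord := PySem.Chars.slice bigWord (some (st.2 : Int)) (some (i : Int))
    (if PySem.Chars.strIsalnum currentWord then st.1 ++ [currentWord] else st.1, i + 1))
    ([], 0)).1
-- (firstSplit = -1 default parameter is unused, exactly as in the Python)

-- try/except around the body: nothing in the body raises, the except branch is dead.
def tokenize_from_text (text : String) : List String :=
  (PySem.Chars.splitlines text.toList).foldl (fun tokens line =>
    (PySem.Chars.split₀ line).foldl (fun tokens word =>
      let valIndex := isValidWord word
      if valIndex = -1 then tokens ++ [String.ofList word]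
      else tokens ++ (getSlicedWords word (-1)).map String.ofList) tokens) []

-- ===== PORT B =====
-- the regex character class [A-Za-z0-9]
def alnumB (c : Char) : Bool :=
  (48 ≤ c.toNat && c.toNat ≤ 57) || (65 ≤ c.toNat && c.toNat ≤ 90) || (97 ≤ c.toNat && c.toNat ≤ 122)

-- re.findall(r'[A-Za-z0-9]+', text): leftmost maximal runs of class characters, in order.
def runs : List Char → List (List Char)
  | [] => []
  | c :: cs =>
    if alnumB c then (c :: cs.takeWhile alnumB) :: runs (cs.dropWhile alnumB)
    else runs cs
termination_by cs => cs.length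
decreasing_by
  · exact Nat.lt_succ_of_le (List.length_dropWhile_le _ _)
  · exact Nat.lt_succ_self _

def tokenize_from_text_alt (text : String) : List String :=
  (runs text.toList).map String.ofList

-- ===== PRECONDITION & SPEC =====
def Spec_tokenize_from_text (text : String) (out : List String) : Prop := out = tokenize_from_text_alt text
instance (text : String) (out : List String) : Decidable (Spec_tokenize_from_text text out) := by unfold Spec_tokenize_from_text; infer_instance

-- ===== CLAIM (what is proved, stated in full; the proofs are below) =====
def Claim_equal_tokenize_from_text : Prop := ∀ (text : String), Dom_tokenize_from_text text → Spec_tokenize_from_text text (tokenize_from_text text)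

-- ===== LEMMAS AND PROOFS =====

lemma isAscii_eq_alnumB (c : Char) : isAsciiChar c = alnumB c := by
  rw [Bool.eq_iff_iff]
  simp only [isAsciiChar, charToAscii, alnumB]
  split_ifs <;> simp only [Bool.or_eq_true, Bool.and_eq_true, decide_eq_true_eq] <;>
    first
      | (constructor <;> intro <;> omega)
      | (simp; omega)

lemma isalnum_eq_alnumB (c : Char) : PySem.Chars.isalnum c = alnumB c := by
  rw [Bool.eq_iff_iff]
  simp only [PySem.Chars.isalnum, PySem.Chars.isalpha, PySem.Chars.isdigit, PySem.Chars.isupper,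
    PySem.Chars.islower, alnumB, Bool.or_eq_true, Bool.and_eq_true, decide_eq_true_eq,
    show ∀ a b : Char, (a ≤ b) ↔ a.toNat ≤ b.toNat from fun _ _ => Iff.rfl,
    show ('A':Char).toNat = 65 from rfl, show ('Z':Char).toNat = 90 from rfl,
    show ('a':Char).toNat = 97 from rfl, show ('z':Char).toNat = 122 from rfl,
    show ('0':Char).toNat = 48 from rfl, show ('9':Char).toNat = 57 from rfl]
  omega

lemma isspace_not_alnumB (c : Char) (h : PySem.Chars.isspace c = true) : alnumB c = false := by
  simp only [PySem.Chars.isspace, Bool.or_eq_true, Bool.and_eq_true, decide_eq_true_eq] at h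
  simp only [alnumB, Bool.or_eq_false_iff, Bool.and_eq_false_iff, decide_eq_false_iff_not, not_le]
  omega

lemma strIsalnum_eq (cs : List Char) :
    PySem.Chars.strIsalnum cs = (!cs.isEmpty && cs.all alnumB) := by
  rw [PySem.Chars.strIsalnum, funext isalnum_eq_alnumB]

-- runs equations and facts
lemma runs_nil : runs [] = [] := by simp [runs]

lemma runs_cons_pos (c : Char) (cs : List Char) (h : alnumB c = true) :
    runs (c :: cs) = (c :: cs.takeWhile alnumB) :: runs (cs.dropWhile alnumB) := by
  rw [runs]; simp [h]

lemma runs_cons_neg (c : Char) (cs : List Char) (h : alnumB c = false) :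
    runs (c :: cs) = runs cs := by
  rw [runs]; simp [h]

lemma runs_all (cs : List Char) (h : cs.all alnumB = true) (hne : cs ≠ []) : runs cs = [cs] := by
  match cs, hne with
  | c :: cs', _ =>
    simp only [List.all_cons, Bool.and_eq_true] at h
    rw [runs_cons_pos c cs' h.1, List.takeWhile_eq_self_iff.mpr ?_, List.dropWhile_eq_nil_iff.mpr ?_]
    · rw [runs]
    · intro x hx; exact (List.all_eq_true.mp h.2) x hx
    · intro x hx; exact (List.all_eq_true.mp h.2) x hx

lemma runs_append_sep (c : Char) (hc : alnumB c = false) :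
    ∀ u v : List Char, runs (u ++ c :: v) = runs u ++ runs v := by
  suffices H : ∀ n u v, u.length ≤ n → runs (u ++ c :: v) = runs u ++ runs v by
    intro u v; exact H u.length u v le_rfl
  intro n
  induction n with
  | zero =>
    intro u v hlen
    rw [List.length_eq_zero_iff.mp (Nat.le_zero.mp hlen)]
    simp [runs_cons_neg _ _ hc, runs]
  | succ n ih =>
    intro u v hlen
    match u with
    | [] => simp [runs_cons_neg _ _ hc, runs]
    | a :: u' =>
      by_cases ha : alnumB a = true
      · rw [List.cons_append, runs_cons_pos _ _ ha, runs_cons_pos _ _ ha,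
          List.takeWhile_append, List.dropWhile_append]
        by_cases hall : (u'.takeWhile alnumB).length = u'.length
        · have hnil : u'.dropWhile alnumB = [] := by
            have := List.takeWhile_append_dropWhile (p := alnumB) (l := u')
            have hlen2 := congrArg List.length this
            simp only [List.length_append] at hlen2
            have : (u'.dropWhile alnumB).length = 0 := by omega
            exact List.length_eq_zero_iff.mp this
          rw [if_pos hall, if_pos (by simp [hnil])]
          rw [List.takeWhile_cons_of_neg (by simp [hc]), List.dropWhile_cons_of_neg (by simp [hc])]
          rw [runs_cons_neg _ _ hc, hnil, runs]
          simp only [List.append_nil, List.nil_append]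
          rw [(List.takeWhile_prefix _).eq_of_length hall]
          simp
        · have hne : u'.dropWhile alnumB ≠ [] := by
            intro hcontra
            have := List.takeWhile_append_dropWhile (p := alnumB) (l := u')
            rw [hcontra, List.append_nil] at this
            exact hall (congrArg List.length this)
          rw [if_neg hall, if_neg (by simpa using hne)]
          rw [ih (u'.dropWhile alnumB) v
            (le_trans (List.length_dropWhile_le _ _) (by simpa using Nat.succ_le_succ_iff.mp hlen))]
          simp
      · rw [List.cons_append, runs_cons_neg _ _ (Bool.not_eq_true _ ▸ eq_false_of_ne_true ha),
          runs_cons_neg _ _ (eq_false_of_ne_true ha)]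
        exact ih u' v (by simpa using Nat.succ_le_succ_iff.mp hlen)

lemma split0_go_flatMap : ∀ cs cur acc,
    (PySem.Chars.split₀.go cs cur acc).flatMap runs
      = acc.reverse.flatMap runs ++ runs (cur.reverse ++ cs) := by
  intro cs cur acc
  induction cs, cur, acc using PySem.Chars.split₀.go.induct with
  | case1 cur acc h =>
    rw [List.isEmpty_iff.mp h]
    simp [PySem.Chars.split₀.go, runs_nil]
  | case2 cur acc h =>
    rw [PySem.Chars.split₀.go]
    simp [h]
  | case3 c rest cur acc hsp hcur ih =>
    rw [PySem.Chars.split₀.go, if_pos hsp, if_pos hcur, List.isEmpty_iff.mp hcur,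
      List.reverse_nil, List.nil_append, runs_cons_neg _ _ (isspace_not_alnumB _ hsp)]
    simpa using ih
  | case4 c rest cur acc hsp hcur ih =>
    rw [PySem.Chars.split₀.go]
    simp only [hsp, if_pos]
    rw [if_neg (by simpa using hcur), ih]
    simp [runs_append_sep _ (isspace_not_alnumB _ hsp)]
  | case5 c rest cur acc hsp ih =>
    rw [PySem.Chars.split₀.go]
    rw [if_neg (by simpa using hsp), ih]
    simp

lemma split0_ne_nil : ∀ cs cur acc, (∀ x ∈ acc, x ≠ ([] : List Char)) →
    ∀ w ∈ PySem.Chars.split₀.go cs cur acc, w ≠ [] := by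
  intro cs cur acc
  induction cs, cur, acc using PySem.Chars.split₀.go.induct with
  | case1 cur acc h =>
    intro hacc w hw
    rw [PySem.Chars.split₀.go, if_pos h] at hw
    exact hacc w (by simpa using hw)
  | case2 cur acc h =>
    intro hacc w hw
    rw [PySem.Chars.split₀.go, if_neg (by simpa using h)] at hw
    simp at hw
    rcases hw with hw | hw
    · exact hacc w (by simpa using hw)
    · subst hw; simpa using (by simpa using h : cur ≠ [])
  | case3 c rest cur acc hsp hcur ih =>
    intro hacc w hw
    rw [PySem.Chars.split₀.go, if_pos hsp, if_pos hcur] at hw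
    exact ih hacc w hw
  | case4 c rest cur acc hsp hcur ih =>
    intro hacc w hw
    rw [PySem.Chars.split₀.go, if_pos hsp, if_neg (by simpa using hcur)] at hw
    refine ih ?_ w hw
    intro x hx
    simp at hx
    rcases hx with hx | hx
    · subst hx; simpa using (by simpa using hcur : cur ≠ [])
    · exact hacc x hx
  | case5 c rest cur acc hsp ih =>
    intro hacc w hw
    rw [PySem.Chars.split₀.go, if_neg (by simpa using hsp)] at hw
    exact ih hacc w hw

lemma splitlines_go_flatMap (isB : Char → Bool) (hB : ∀ c, isB c = true → alnumB c = false) :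
    ∀ cs cur acc,
    (PySem.Chars.splitlines.go isB cs cur acc).flatMap runs
      = acc.reverse.flatMap runs ++ runs (cur.reverse ++ cs) := by
  intro cs cur acc
  induction cs, cur, acc using PySem.Chars.splitlines.go.induct (isB := isB) with
  | case1 cur acc h =>
    rw [List.isEmpty_iff.mp h]
    simp [PySem.Chars.splitlines.go, runs_nil]
  | case2 cur acc h =>
    rw [PySem.Chars.splitlines.go]
    simp [h]
  | case3 rest cur acc ih =>
    rw [PySem.Chars.splitlines.go]
    rw [ih, runs_append_sep '\r' (by decide) _ ('\n' :: rest), runs_cons_neg '\n' _ (by decide)]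
    simp
  | case4 c rest cur acc hne hB' ih =>
    rw [PySem.Chars.splitlines.go]
    case x_3 => exact hne
    rw [if_pos hB', ih, runs_append_sep c (hB c hB') _ rest]
    simp
  | case5 c rest cur acc hne hB' ih =>
    rw [PySem.Chars.splitlines.go]
    case x_3 => exact hne
    rw [if_neg hB', ih]
    simp

def sliceFold (cs : List Char) : Nat → List Nat → List (List Char)
  | _, [] => []
  | p, i :: rest =>
    (if PySem.Chars.strIsalnum (PySem.Chars.slice cs (some (p : Int)) (some (i : Int)))
     then [PySem.Chars.slice cs (some (p : Int)) (some (i : Int))] else [])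
    ++ sliceFold cs (i + 1) rest

lemma foldl_eq_sliceFold (cs : List Char) : ∀ (idxs : List Nat) (acc : List (List Char)) (p : Nat),
    (idxs.foldl (fun (st : List (List Char) × Nat) (i : Nat) =>
      let currentWord := PySem.Chars.slice cs (some (st.2 : Int)) (some (i : Int))
      (if PySem.Chars.strIsalnum currentWord then st.1 ++ [currentWord] else st.1, i + 1))
      (acc, p)).1 = acc ++ sliceFold cs p idxs := by
  intro idxs
  induction idxs with
  | nil => intro acc p; simp [sliceFold]
  | cons i rest ih =>
    intro acc p
    simp only [List.foldl_cons, sliceFold]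
    rw [ih]
    split_ifs <;> simp

lemma slice_shift (pre cs : List Char) (p i : Nat) :
    PySem.List.slice (pre ++ cs) (some ((pre.length + p : Nat) : Int)) (some ((pre.length + i : Nat) : Int))
      = PySem.List.slice cs (some (p : Int)) (some (i : Int)) := by
  simp only [PySem.List.slice, PySem.List.clampIdx]
  rw [if_neg (by omega), if_neg (by omega), if_neg (by omega), if_neg (by omega)]
  simp only [Int.toNat_natCast, List.length_append]
  rw [List.drop_append]
  have hd : List.drop (min (pre.length + p) (pre.length + cs.length)) pre = [] :=
    List.drop_eq_nil_of_le (by omega)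
  rw [hd]
  simp only [List.nil_append]
  have e1 : min (pre.length + p) (pre.length + cs.length) - pre.length = min p cs.length := by omega
  have e2 : min (pre.length + i) (pre.length + cs.length) - min (pre.length + p) (pre.length + cs.length)
      = min i cs.length - min p cs.length := by omega
  rw [e1, e2]

lemma slice_zero_take (cs : List Char) (i : Nat) :
    PySem.List.slice cs (some ((0:Nat) : Int)) (some ((i : Nat) : Int)) = cs.take i := by
  simp only [PySem.List.slice, PySem.List.clampIdx]
  rw [if_neg (by omega), if_neg (by omega)]
  simp only [Int.toNat_natCast, Int.toNat_zero, Nat.zero_min, List.drop_zero]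
  rw [Nat.sub_zero]
  rcases Nat.le_total i cs.length with h | h
  · rw [Nat.min_eq_left h]
  · rw [Nat.min_eq_right h, List.take_length, List.take_of_length_le h]

lemma sliceFold_shift (pre cs : List Char) : ∀ (idxs : List Nat) (p : Nat),
    sliceFold (pre ++ cs) (pre.length + p) (idxs.map (pre.length + ·))
      = sliceFold cs p idxs := by
  intro idxs
  induction idxs with
  | nil => intro p; simp [sliceFold]
  | cons i rest ih =>
    intro p
    simp only [List.map_cons, sliceFold, PySem.Chars.slice_eq_listSlice]
    rw [slice_shift, show pre.length + i + 1 = pre.length + (i + 1) from by omega, ih]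

lemma go_shift (cs : List Char) : ∀ i : Nat,
    getSliceIndicesGo cs i = (getSliceIndicesGo cs 0).map (i + ·) := by
  induction cs with
  | nil => intro i; simp [getSliceIndicesGo]
  | cons c rest ih =>
    intro i
    simp only [getSliceIndicesGo]
    rw [ih (i+1), ih 1]
    by_cases h : isAsciiChar c = true <;>
      simp [h, List.map_map, Function.comp_def] <;> (intros; omega)

lemma go_all_nil (t : List Char) (ht : t.all alnumB = true) : getSliceIndicesGo t 0 = [] := by
  induction t with
  | nil => simp [getSliceIndicesGo]
  | cons c rest ih =>
    simp only [List.all_cons, Bool.and_eq_true] at ht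
    simp only [getSliceIndicesGo]
    rw [go_shift rest 1, ih ht.2]
    simp [isAscii_eq_alnumB, ht.1]

lemma go_alnum_prefix (t : List Char) : ∀ d : List Char, t.all alnumB = true →
    getSliceIndicesGo (t ++ d) 0 = (getSliceIndicesGo d 0).map (t.length + ·) := by
  induction t with
  | nil => intro d _; simp
  | cons c rest ih =>
    intro d ht
    simp only [List.all_cons, Bool.and_eq_true] at ht
    simp only [List.cons_append, getSliceIndicesGo]
    rw [go_shift (rest ++ d) 1, ih d ht.2, List.map_map]
    simp [isAscii_eq_alnumB, ht.1, Function.comp_def]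
    intros; omega

lemma sliceFold_main : ∀ (n : Nat) (cs : List Char), cs.length ≤ n →
    sliceFold cs 0 (getSliceIndicesGo cs 0 ++ [cs.length]) = runs cs := by
  intro n
  induction n with
  | zero =>
    intro cs hlen
    rw [List.length_eq_zero_iff.mp (Nat.le_zero.mp hlen)]
    simp [getSliceIndicesGo, sliceFold, strIsalnum_eq, runs_nil,
      PySem.Chars.slice_eq_listSlice, PySem.List.slice, PySem.List.clampIdx]
  | succ n ih =>
    intro cs hlen
    match cs with
    | [] =>
      simp [getSliceIndicesGo, sliceFold, strIsalnum_eq, runs_nil,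
        PySem.Chars.slice_eq_listSlice, PySem.List.slice, PySem.List.clampIdx]
    | c :: cs' =>
      by_cases hc : alnumB c = true
      · -- alnum head
        have htake : (cs'.takeWhile alnumB).all alnumB = true := List.all_takeWhile
        set t := cs'.takeWhile alnumB with htdef
        set d := cs'.dropWhile alnumB with hddef
        have hsplit : t ++ d = cs' := List.takeWhile_append_dropWhile
        have hgo : getSliceIndicesGo (c :: cs') 0 = (getSliceIndicesGo cs' 0).map (1 + ·) := by
          simp only [getSliceIndicesGo, isAscii_eq_alnumB, hc]
          rw [go_shift cs' 1]
          simp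
        match hd : d, hsplit with
        | [], hsplit =>
          have hall : cs'.all alnumB = true := by rw [← hsplit]; simpa using htake
          have hgonil : getSliceIndicesGo cs' 0 = [] := go_all_nil cs' hall
          rw [hgo, hgonil]
          simp only [List.map_nil, List.nil_append, sliceFold]
          simp only [PySem.Chars.slice_eq_listSlice]
          rw [slice_zero_take, List.take_length]
          rw [strIsalnum_eq]
          simp only [List.isEmpty_cons, Bool.not_false, List.all_cons, hc, Bool.true_and, hall]
          rw [runs_all (c :: cs') (by simp [hc, hall]) (by simp)]
          simp [sliceFold]
        | b :: d', hsplit =>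
          have hdw : cs'.dropWhile alnumB ≠ [] := by rw [← hddef]; simp
          have hb : alnumB b = false := by
            have h2 := List.head_dropWhile_not alnumB (l := cs') hdw
            simp only [← hddef, List.head_cons] at h2
            exact h2
          have h1 : t.length + d'.length + 1 = cs'.length := by
            have h2 := congrArg List.length hsplit
            simp at h2
            omega
          have hlen' : d'.length ≤ n := by
            simp only [List.length_cons] at hlen; omega
          have hcs : c :: cs' = (c :: t ++ [b]) ++ d' := by rw [← hsplit]; simp
          have hgocs' : getSliceIndicesGo cs' 0
              = (getSliceIndicesGo (b :: d') 0).map (t.length + ·) := by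
            rw [← hsplit]
            exact go_alnum_prefix t (b :: d') htake
          have hgobd : getSliceIndicesGo (b :: d') 0 = 0 :: (getSliceIndicesGo d' 0).map (1 + ·) := by
            simp only [getSliceIndicesGo, isAscii_eq_alnumB, hb]
            rw [go_shift d' 1]
            simp
          have hidx : getSliceIndicesGo (c :: cs') 0 ++ [(c :: cs').length]
              = (1 + t.length) :: ((getSliceIndicesGo d' 0 ++ [d'.length]).map ((t.length + 2) + ·)) := by
            rw [hgo, hgocs', hgobd]
            simp only [List.map_cons, List.map_map, List.map_append, List.cons_append,
              List.length_cons, Function.comp_def, List.map_nil, List.append_nil]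
            rw [show (1 + (t.length + 0)) = 1 + t.length from by omega,
              show cs'.length + 1 = t.length + 2 + d'.length from by omega,
              List.map_congr_left
                (fun x _ => by show 1 + (t.length + (1 + x)) = t.length + 2 + x; omega : ∀ x ∈ getSliceIndicesGo d' 0,
                  (fun x => 1 + (t.length + (1 + x))) x = (fun x => t.length + 2 + x) x)]
          rw [hidx]
          simp only [sliceFold, PySem.Chars.slice_eq_listSlice]
          have htk : PySem.List.slice (c :: cs') (some ((0:Nat) : Int)) (some ((1 + t.length : Nat) : Int)) = c :: t := by
            rw [slice_zero_take, ← hsplit, show 1 + t.length = t.length + 1 from by omega,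
              List.take_succ_cons, List.take_left]
          rw [htk, strIsalnum_eq]
          simp only [List.isEmpty_cons, Bool.not_false, List.all_cons, hc, Bool.true_and, htake,
            if_pos]
          have hsh := sliceFold_shift (c :: t ++ [b]) d' (getSliceIndicesGo d' 0 ++ [d'.length]) 0
          simp only [List.length_cons, List.length_append, List.length_nil, Nat.add_zero] at hsh
          rw [show (t.length + 1 + 1 : Nat) = t.length + 2 from by omega] at hsh
          rw [show (1 + t.length + 1 : Nat) = t.length + 2 from by omega]
          rw [← hcs] at hsh
          rw [hsh, ih d' hlen']
          rw [runs_cons_pos c cs' hc, ← htdef, ← hddef, runs_cons_neg b d' hb]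
          simp
      · -- non-alnum head
        have hc' : alnumB c = false := eq_false_of_ne_true hc
        have hgo : getSliceIndicesGo (c :: cs') 0 = 0 :: (getSliceIndicesGo cs' 0).map (1 + ·) := by
          simp only [getSliceIndicesGo, isAscii_eq_alnumB, hc']
          rw [go_shift cs' 1]
          simp
        rw [hgo]
        simp only [List.cons_append, sliceFold]
        simp only [PySem.Chars.slice_eq_listSlice]
        rw [slice_zero_take (c :: cs') 0]
        simp only [List.take_zero, strIsalnum_eq, List.isEmpty_nil, Bool.not_true, Bool.false_and,
          Bool.false_eq_true, if_false, List.nil_append]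
        have hmap : (getSliceIndicesGo cs' 0).map (1 + ·) ++ [(c :: cs').length]
            = ((getSliceIndicesGo cs' 0 ++ [cs'.length]).map (1 + ·)) := by
          simp; omega
        rw [hmap]
        have hshift := sliceFold_shift [c] cs' (getSliceIndicesGo cs' 0 ++ [cs'.length]) 0
        simp only [List.length_cons, List.length_nil, List.singleton_append, Nat.add_zero] at hshift
        rw [show (0 : Nat) + 1 = 1 from rfl] at hshift
        rw [hshift, ih cs' (by simpa using Nat.succ_le_succ_iff.mp hlen), runs_cons_neg _ _ hc']

lemma flatMap_congr_mem {α β : Type} (l : List α) (f g : α → List β)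
    (h : ∀ x ∈ l, f x = g x) : l.flatMap f = l.flatMap g := by
  induction l with
  | nil => rfl
  | cons a l ih =>
    simp only [List.flatMap_cons]
    rw [h a (by simp), ih (fun x hx => h x (by simp [hx]))]

lemma getSlicedWords_eq_runs (cs : List Char) (fs : Int) : getSlicedWords cs fs = runs cs := by
  unfold getSlicedWords getSliceIndices
  rw [foldl_eq_sliceFold]
  simp only [List.nil_append]
  exact sliceFold_main cs.length cs le_rfl

lemma isValidWordGo_eq_neg_one (cs : List Char) : ∀ i : Nat,
    (isValidWordGo cs i = -1) ↔ cs.all alnumB = true := by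
  induction cs with
  | nil => intro i; simp [isValidWordGo]
  | cons c rest ih =>
    intro i
    simp only [isValidWordGo, List.all_cons, Bool.and_eq_true, isAscii_eq_alnumB]
    by_cases h : alnumB c = true
    · simp [h, ih (i+1)]
    · simp [eq_false_of_ne_true h]

lemma isB_not_alnumB : ∀ c : Char,
    (decide (c.toNat = 10) || decide (c.toNat = 13) || decide (c.toNat = 11) || decide (c.toNat = 12)
      || decide (c.toNat = 28) || decide (c.toNat = 29) || decide (c.toNat = 30)
      || decide (c.toNat = 133) || decide (c.toNat = 8232) || decide (c.toNat = 8233)) = true →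
    alnumB c = false := by
  intro c h
  simp only [Bool.or_eq_true, decide_eq_true_eq] at h
  simp only [alnumB, Bool.or_eq_false_iff, Bool.and_eq_false_iff, decide_eq_false_iff_not, not_le]
  omega

lemma tokenize_eq (cs : List Char) :
    (PySem.Chars.splitlines cs).foldl (fun tokens line =>
      (PySem.Chars.split₀ line).foldl (fun tokens word =>
        let valIndex := isValidWord word
        if valIndex = -1 then tokens ++ [String.ofList word]
        else tokens ++ (getSlicedWords word (-1)).map String.ofList) tokens) []
    = (runs cs).map String.ofList := by
  have hword : ∀ (l : List Char) (w : List Char), w ∈ PySem.Chars.split₀ l →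
      (if isValidWord w = -1 then [String.ofList w]
       else (getSlicedWords w (-1)).map String.ofList) = (runs w).map String.ofList := by
    intro l w hw
    have hne : w ≠ [] := split0_ne_nil l [] [] (by simp) w hw
    by_cases hv : isValidWord w = -1
    · have hall : w.all alnumB = true := (isValidWordGo_eq_neg_one w 0).mp hv
      rw [if_pos hv, runs_all w hall hne]
      simp
    · rw [if_neg hv, getSlicedWords_eq_runs]
  have hinner : ∀ (l : List Char) (acc : List String),
      (PySem.Chars.split₀ l).foldl (fun tokens word =>
        let valIndex := isValidWord word
        if valIndex = -1 then tokens ++ [String.ofList word]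
        else tokens ++ (getSlicedWords word (-1)).map String.ofList) acc
      = acc ++ ((PySem.Chars.split₀ l).flatMap runs).map String.ofList := by
    intro l acc
    have hfun : (fun (tokens : List String) (word : List Char) =>
        let valIndex := isValidWord word
        if valIndex = -1 then tokens ++ [String.ofList word]
        else tokens ++ (getSlicedWords word (-1)).map String.ofList)
        = fun tokens word => tokens ++ (if isValidWord word = -1 then [String.ofList word]
            else (getSlicedWords word (-1)).map String.ofList) := by
      funext tokens word
      dsimp only
      split_ifs <;> rfl
    rw [hfun, PySem.List.foldl_append_eq_flatMap]
    rw [flatMap_congr_mem _ _ _ (hword l), ← List.map_flatMap]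
  have houter : (PySem.Chars.splitlines cs).foldl (fun tokens line =>
      (PySem.Chars.split₀ line).foldl (fun tokens word =>
        let valIndex := isValidWord word
        if valIndex = -1 then tokens ++ [String.ofList word]
        else tokens ++ (getSlicedWords word (-1)).map String.ofList) tokens) []
      = [] ++ ((PySem.Chars.splitlines cs).flatMap (fun l => ((PySem.Chars.split₀ l).flatMap runs).map String.ofList)) := by
    have hfun2 : (fun (tokens : List String) (line : List Char) =>
        (PySem.Chars.split₀ line).foldl (fun tokens word =>
          let valIndex := isValidWord word
          if valIndex = -1 then tokens ++ [String.ofList word]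
          else tokens ++ (getSlicedWords word (-1)).map String.ofList) tokens)
        = fun tokens line => tokens ++ ((PySem.Chars.split₀ line).flatMap runs).map String.ofList := by
      funext tokens line
      exact hinner line tokens
    rw [hfun2, PySem.List.foldl_append_eq_flatMap]
  rw [houter]
  simp only [List.nil_append]
  have hsplit0 : ∀ l : List Char, (PySem.Chars.split₀ l).flatMap runs = runs l := by
    intro l
    have := split0_go_flatMap l [] []
    simpa [PySem.Chars.split₀] using this
  rw [flatMap_congr_mem _ _ (fun l => (runs l).map String.ofList)
    (fun l _ => by rw [hsplit0 l]), ← List.map_flatMap]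
  congr 1
  have := splitlines_go_flatMap
    (fun c => decide (c.toNat = 10) || decide (c.toNat = 13) || decide (c.toNat = 11)
      || decide (c.toNat = 12) || decide (c.toNat = 28) || decide (c.toNat = 29)
      || decide (c.toNat = 30) || decide (c.toNat = 133) || decide (c.toNat = 8232)
      || decide (c.toNat = 8233)) isB_not_alnumB cs [] []
  simpa [PySem.Chars.splitlines] using this

-- ===== VERDICT (by name: the statement is the Claim_ definition above) =====
theorem tokenize_from_text_spec : Claim_equal_tokenize_from_text := by
  intro text _
  unfold Spec_tokenize_from_text tokenize_from_text tokenize_from_text_alt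
  exact tokenize_eq text.toList
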